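-- pv_equiv track=rewrite | github.com/SciTable-table-2-text/SciTable | Extract_Table_Paregraphs.py | remove_inline_comments_only
-- ===== SOURCE A (Python) =====
-- def remove_inline_comments_only(text):
--     """
--     Remove inline % comments from LaTeX code, only outside of full-line comments.
--     Keeps full-line % comments untouched and handles escaped % properly.
--     """
--     def remove_inline(line):
--         result = []
--         i = 0
--         while i < len(line):
--             if line[i] == '%':
--                 if i > 0 and line[i-1] == '\\':  # escaped %, keep going
--                     result.append('%')
--                     i += 1
--                 else:
--                     break  # unescaped %, comment starts here
--             else:
--                 result.append(line[i])
--                 i += 1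
--         return ''.join(result)
--
--     lines = text.splitlines()
--     new_lines = []
--     for line in lines:
--         stripped = line.lstrip()
--         if stripped.startswith('%'):  # full-line comment, preserve
--             new_lines.append(line)
--         else:
--             new_lines.append(remove_inline(line))
--     return '\n'.join(new_lines)
-- ===== SOURCE B (Python) =====
-- def remove_inline_comments_only(text):
--     # B: instead of building each kept line character by character, find the
--     # index of the first unescaped '%' (tracking the previous character) and
--     # slice the line there; full-line comments are kept untouched.
--     def cut(line):
--         prev = ''
--         for i, ch in enumerate(line):
--             if ch == '%' and prev != '\\':
--                 return line[:i]
--             prev = ch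
--         return line
--
--     return '\n'.join(line if line.lstrip().startswith('%') else cut(line)
--                      for line in text.splitlines())
-- ===== Notes on version B (the rewrite author's own statement) =====
-- stated objective: faster
-- what changed: Per line, B finds the index of the first unescaped percent sign (tracking the previous character) and slices the line there, instead of A's character-by-character rebuild with an append/break accumulator loop.
import Mathlib
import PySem

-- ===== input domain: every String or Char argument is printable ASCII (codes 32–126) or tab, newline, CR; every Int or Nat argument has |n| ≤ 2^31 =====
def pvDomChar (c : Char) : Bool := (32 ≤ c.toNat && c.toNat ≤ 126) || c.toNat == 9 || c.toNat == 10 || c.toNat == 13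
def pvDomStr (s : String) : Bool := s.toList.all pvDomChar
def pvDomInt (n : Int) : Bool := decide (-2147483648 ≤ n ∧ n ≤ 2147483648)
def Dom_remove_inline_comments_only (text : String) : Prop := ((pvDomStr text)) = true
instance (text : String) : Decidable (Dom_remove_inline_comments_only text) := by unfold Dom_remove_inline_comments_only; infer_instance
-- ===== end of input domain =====

-- B removes each inline-comment tail by locating the first unescaped '%' and slicing,
-- instead of A's character-by-character rebuild; return values are proved equal on all inputs.

-- ===== PORT A =====
-- A's inner while loop: index i, accumulator `result`, break on unescaped '%'.
def pvALoop (cs : List Char) (i : Nat) (result : List Char) : List Char :=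
  if _h : i < cs.length then
    if PySem.List.pyGet? cs (i : Int) = some '%' then
      if i > 0 && (PySem.List.pyGet? cs ((i : Int) - 1) == some '\\') then
        pvALoop cs (i + 1) (result ++ ['%'])   -- escaped %, keep going
      else
        result                                  -- break: unescaped %
    else
      pvALoop cs (i + 1) (result ++ [PySem.List.pyGet? cs (i : Int) |>.getD ' '])
  else result
termination_by cs.length - i

def pvRemoveInline (line : String) : String :=
  String.mk (pvALoop line.toList 0 [])

def remove_inline_comments_only (text : String) : String :=
  let lines := PySem.Str.splitlines text
  let newLines := lines.foldl (fun acc line =>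
    let stripped := PySem.Str.lstrip line
    if PySem.Str.startswith stripped "%" then acc ++ [line]
    else acc ++ [pvRemoveInline line]) []
  PySem.Str.join "\n" newLines

-- ===== PORT B =====
-- B's cut: find the index of the first '%' whose previous char is not '\' and slice there.
-- prev = '' at the start of the Python loop is modelled as `none`.
def pvBIdx : List Char → Nat → Option Char → Option Nat
  | [], _, _ => none
  | c :: rest, i, prev =>
    if c = '%' && prev != some '\\' then some i
    else pvBIdx rest (i + 1) (some c)

def pvBCut (line : String) : String :=
  match pvBIdx line.toList 0 none with
  | some i => String.mk (line.toList.take i)    -- line[:i]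
  | none => line

def remove_inline_comments_only_alt (text : String) : String :=
  PySem.Str.join "\n"
    ((PySem.Str.splitlines text).map (fun line =>
      if PySem.Str.startswith (PySem.Str.lstrip line) "%" then line else pvBCut line))

-- ===== PRECONDITION & SPEC =====
def Spec_remove_inline_comments_only (text : String) (out : String) : Prop := out = remove_inline_comments_only_alt text
instance (text : String) (out : String) : Decidable (Spec_remove_inline_comments_only text out) := by unfold Spec_remove_inline_comments_only; infer_instance

-- ===== CLAIM (what is proved, stated in full; the proofs are below) =====
def Claim_equal_remove_inline_comments_only : Prop := ∀ (text : String), Dom_remove_inline_comments_only text → Spec_remove_inline_comments_only text (remove_inline_comments_only text)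

-- ===== LEMMAS AND PROOFS =====

-- reference per-line function: structural recursion with the previous character
def pvF : List Char → Option Char → List Char
  | [], _ => []
  | c :: rest, prev =>
    if c = '%' then
      if prev = some '\\' then '%' :: pvF rest (some '%') else []
    else c :: pvF rest (some c)

def pvPrevAt (cs : List Char) (i : Nat) : Option Char :=
  if i = 0 then none else cs[i-1]?

theorem pvALoop_eq_f (cs : List Char) : ∀ n i result, n = cs.length - i →
    pvALoop cs i result = result ++ pvF (cs.drop i) (pvPrevAt cs i) := by
  intro n
  induction n with
  | zero =>
    intro i result h
    have hi : cs.length ≤ i := by omega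
    rw [pvALoop]
    simp [Nat.not_lt.mpr hi, List.drop_eq_nil_of_le hi, pvF]
  | succ n ih =>
    intro i result h
    have hi : i < cs.length := by omega
    have hdrop : cs.drop i = cs[i] :: cs.drop (i + 1) := List.drop_eq_getElem_cons hi
    have hget : PySem.List.pyGet? cs (i : Int) = some cs[i] := by
      simp [PySem.List.pyGet?, PySem.List.pyIdx?, hi]
    have hprev1 : pvPrevAt cs (i + 1) = some cs[i] := by
      simp [pvPrevAt, List.getElem?_eq_getElem hi]
    rw [pvALoop]
    by_cases hc : cs[i] = '%'
    · by_cases hp : pvPrevAt cs i = some '\\'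
      · -- escaped
        have hi0 : 0 < i := by
          by_contra h0
          simp [pvPrevAt, Nat.eq_zero_of_not_pos h0] at hp
        have hpm : cs[i-1]? = some '\\' := by simpa [pvPrevAt, Nat.pos_iff_ne_zero.mp hi0] using hp
        have hgm : PySem.List.pyGet? cs ((i : Int) - 1) = some '\\' := by
          have hi1 : i - 1 < cs.length := by omega
          have : ((i : Int) - 1) = ((i - 1 : Nat) : Int) := by omega
          rw [this]
          simp [PySem.List.pyGet?, PySem.List.pyIdx?, hi1, List.getElem?_eq_getElem hi1] at hpm ⊢
          exact hpm
        simp only [hget, hc, hgm, if_pos rfl]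
        simp only [hi, dif_pos, beq_self_eq_true, Bool.and_true, decide_eq_true_eq]
        rw [if_pos (by trivial), ih (i+1) (result ++ ['%']) (by omega)]
        rw [hdrop, hprev1]
        simp [pvF, hc, hp, ← hc]
        omega
      · -- unescaped: break
        have hcond : (decide (i > 0) && (PySem.List.pyGet? cs ((i : Int) - 1) == some '\\')) = false := by
          by_cases hi0 : i = 0
          · simp [hi0]
          · have hi1 : i - 1 < cs.length := by omega
            have hpm : cs[i-1]? ≠ some '\\' := by simpa [pvPrevAt, hi0] using hp
            have : ((i : Int) - 1) = ((i - 1 : Nat) : Int) := by omega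
            rw [this]
            simp [PySem.List.pyGet?, PySem.List.pyIdx?, hi1] at hpm ⊢
            exact fun _ => hpm
        simp only [hi, dif_pos, hget, hc, if_pos rfl, hcond, Bool.false_eq_true, if_neg,
          not_false_iff]
        rw [hdrop]
        simp [pvF, hc, hp]
    · -- ordinary char
      simp only [hi, dif_pos, hget]
      rw [if_neg (by simpa using hc)]
      rw [ih (i+1) _ (by omega), hdrop, hprev1]
      simp [pvF, hc]

-- B's index search, relative form
theorem pvBIdx_shift : ∀ (l : List Char) (i : Nat) (prev : Option Char),
    pvBIdx l i prev = (pvBIdx l 0 prev).map (· + i) := by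
  intro l
  induction l with
  | nil => intro i prev; simp [pvBIdx]
  | cons c rest ih =>
    intro i prev
    by_cases h : (c = '%' && prev != some '\\') = true
    · simp [pvBIdx, h]
    · rw [pvBIdx, if_neg h, pvBIdx, if_neg h, ih (i+1), ih 1]
      cases pvBIdx rest 0 (some c) <;> simp <;> omega

theorem pvF_eq_cut (l : List Char) : ∀ prev,
    pvF l prev = (match pvBIdx l 0 prev with
                  | some i => l.take i
                  | none => l) := by
  induction l with
  | nil => intro prev; simp [pvF, pvBIdx]
  | cons c rest ih =>
    intro prev
    by_cases hc : c = '%'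
    · by_cases hp : prev = some '\\'
      · subst hc
        rw [pvF, if_pos rfl, if_pos hp, pvBIdx, if_neg (by simp [hp]), pvBIdx_shift,
          ih (some '%')]
        cases h : pvBIdx rest 0 (some '%') <;> simp [h]
      · rw [pvF, if_pos hc, if_neg hp, pvBIdx,
          if_pos (by simp [hc]; intro h; exact hp h)]
        simp
    · rw [pvF, if_neg hc, pvBIdx, if_neg (by simp [hc]), pvBIdx_shift, ih (some c)]
      cases h : pvBIdx rest 0 (some c) <;> simp [h]

theorem pvRemoveInline_eq_cut (line : String) : pvRemoveInline line = pvBCut line := by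
  unfold pvRemoveInline pvBCut
  rw [pvALoop_eq_f line.toList (line.toList.length - 0) 0 [] rfl]
  have hprev : pvPrevAt line.toList 0 = none := rfl
  rw [List.drop_zero, hprev, List.nil_append, pvF_eq_cut line.toList none]
  cases h : pvBIdx line.toList 0 none <;> simp [h, String.mk]

theorem pvFoldl_append (f : String → String) (lines : List String) : ∀ acc,
    lines.foldl (fun acc line =>
      let stripped := PySem.Str.lstrip line
      if PySem.Str.startswith stripped "%" then acc ++ [line]
      else acc ++ [f line]) acc
    = acc ++ lines.map (fun line =>
        if PySem.Str.startswith (PySem.Str.lstrip line) "%" then line else f line) := by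
  induction lines with
  | nil => intro acc; simp
  | cons l rest ih =>
    intro acc
    rw [List.foldl_cons, List.map_cons, ih]
    by_cases h : PySem.Str.startswith (PySem.Str.lstrip l) "%" = true
    · simp only [h, if_true, List.append_assoc, List.singleton_append]
    · simp only [h, if_false, Bool.false_eq_true, if_neg, not_false_iff,
        List.append_assoc, List.singleton_append]

-- ===== VERDICT (by name: the statement is the Claim_ definition above) =====
theorem remove_inline_comments_only_spec : Claim_equal_remove_inline_comments_only := by
  intro text _
  unfold Spec_remove_inline_comments_only
  simp only [remove_inline_comments_only, remove_inline_comments_only_alt]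
  rw [pvFoldl_append pvRemoveInline (PySem.Str.splitlines text) []]
  simp only [List.nil_append]
  congr 1
  exact List.map_congr_left (fun line _ => by rw [pvRemoveInline_eq_cut])
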